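-- pv_equiv track=rewrite | github.com/otistikNeuron/localTool | main.py | validate_guid_structure
-- ===== SOURCE A (Python) =====
-- def validate_guid_structure(guid):
--     """Extended GUID structure validation"""
--     try:
--         # Check GUID version (RFC 4122)
--         parts = guid.split('-')
--         if len(parts) != 5:
--             return False
--
--         # Check part lengths
--         if len(parts[0]) != 8 or len(parts[1]) != 4 or len(parts[2]) != 4 or len(parts[3]) != 4 or len(parts[4]) != 12:
--             return False
--
--         # Check hex characters
--         hex_chars = set('0123456789ABCDEF')
--         clean_guid = guid.replace('-', '')
--         if not all(c in hex_chars for c in clean_guid):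
--             return False
--
--         # Check version (4th character of 3rd group should be 4)
--         version_char = parts[2][0]
--         if version_char not in '4':
--             return False  # iOS commonly uses version 4
--
--         # Check variant (8,9,A,B - 2 high bits)
--         variant_char = parts[3][0]
--         if variant_char not in '89AB':
--             return False
--
--         return True
--
--     except Exception:
--         return False
-- ===== SOURCE B (Python) =====
-- import re
--
-- _GUID_RE = re.compile(r'[0-9A-F]{8}-[0-9A-F]{4}-4[0-9A-F]{3}-[89AB][0-9A-F]{3}-[0-9A-F]{12}')
--
--
-- def validate_guid_structure(guid):
--     """Extended GUID structure validation: one regex full-match pass."""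
--     try:
--         return _GUID_RE.fullmatch(guid) is not None
--     except Exception:
--         return False
-- ===== Notes on version B (the rewrite author's own statement) =====
-- stated objective: idiomatic
-- what changed: Replaced the split-into-parts + length checks + hex-set scan + positional version/variant tests by a single precompiled regex fullmatch pass over the string.
import Mathlib
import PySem

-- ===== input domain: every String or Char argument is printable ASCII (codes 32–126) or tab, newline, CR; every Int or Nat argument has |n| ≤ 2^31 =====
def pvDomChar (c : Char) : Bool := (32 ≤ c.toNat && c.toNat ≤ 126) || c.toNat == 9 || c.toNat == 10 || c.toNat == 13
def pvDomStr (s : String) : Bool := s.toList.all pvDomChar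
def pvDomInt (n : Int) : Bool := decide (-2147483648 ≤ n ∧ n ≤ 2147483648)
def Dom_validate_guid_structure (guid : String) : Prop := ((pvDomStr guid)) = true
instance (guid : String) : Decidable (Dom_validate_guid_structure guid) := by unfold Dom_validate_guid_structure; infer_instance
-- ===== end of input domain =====

-- B replaces A's split + length checks + hex scan + positional tests by one
-- regex-style full-match pass over the string (objective: idiomatic/alternative).

-- ===== PORT A =====
-- hex_chars = set('0123456789ABCDEF')
def pvHexSet : List Char := PySem.Set.ofList "0123456789ABCDEF".toList

def validate_guid_structure (guid : String) : Bool :=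
  -- try/except Exception: return False — every raising primitive (none) yields false
  match PySem.Chars.split? guid.toList "-".toList with
  | none => false          -- unreachable: the separator '-' is nonempty
  | some parts =>
    if parts.length != 5 then false
    else
      match parts with
      | [p0, p1, p2, p3, p4] =>   -- parts[0] … parts[4] (length just checked)
        if p0.length != 8 || p1.length != 4 || p2.length != 4 || p3.length != 4
            || p4.length != 12 then false
        else
          let clean_guid := PySem.Chars.replace guid.toList "-".toList "".toList
          if !(clean_guid.all (fun c => pvHexSet.contains c)) then false
          else
            match PySem.Chars.pyGet? p2 0 with
            | none => false      -- IndexError → except → False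
            | some version_char =>
              if !(PySem.Chars.isIn [version_char] "4".toList) then false
              else
                match PySem.Chars.pyGet? p3 0 with
                | none => false  -- IndexError → except → False
                | some variant_char =>
                  if !(PySem.Chars.isIn [variant_char] "89AB".toList) then false
                  else true
      | _ => false               -- unreachable: parts.length = 5

-- ===== PORT B =====
-- Hand port of re.fullmatch(r'[0-9A-F]{8}-[0-9A-F]{4}-4[0-9A-F]{3}-[89AB][0-9A-F]{3}-[0-9A-F]{12}', guid):
-- the regex is a fixed-length concatenation of character classes, so fullmatch
-- semantics is exactly: each position of the string satisfies its class and the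
-- lengths agree (no backtracking can occur); exact for this regex.
def pvHexClass (c : Char) : Bool := "0123456789ABCDEF".toList.contains c   -- class [0-9A-F]

def pvGuidPattern : List (Char → Bool) :=
  List.replicate 8 pvHexClass ++ [fun c => c == '-'] ++
  List.replicate 4 pvHexClass ++ [fun c => c == '-'] ++
  [fun c => c == '4'] ++ List.replicate 3 pvHexClass ++ [fun c => c == '-'] ++
  [fun c => "89AB".toList.contains c] ++ List.replicate 3 pvHexClass ++
  [fun c => c == '-'] ++ List.replicate 12 pvHexClass

def pvFullmatch : List (Char → Bool) → List Char → Bool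
  | [], cs => cs.isEmpty
  | p :: ps, cs =>
    match cs with
    | [] => false
    | c :: cs' => p c && pvFullmatch ps cs' 

def validate_guid_structure_alt (guid : String) : Bool :=
  pvFullmatch pvGuidPattern guid.toList

-- ===== PRECONDITION & SPEC =====
def Spec_validate_guid_structure (guid : String) (out : Bool) : Prop := out = validate_guid_structure_alt guid
instance (guid : String) (out : Bool) : Decidable (Spec_validate_guid_structure guid out) := by unfold Spec_validate_guid_structure; infer_instance

-- ===== CLAIM (what is proved, stated in full; the proofs are below) =====
def Claim_equal_validate_guid_structure : Prop := ∀ (guid : String), Dom_validate_guid_structure guid → Spec_validate_guid_structure guid (validate_guid_structure guid)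

-- ===== LEMMAS AND PROOFS =====

-- A structural single-char split on '-', equal to PySem.Chars.splitOn · ['-'].
def split1 : List Char → List (List Char)
  | [] => [[]]
  | c :: t =>
    if c = '-' then [] :: split1 t
    else
      match split1 t with
      | [] => [[c]]
      | p :: ps => (c :: p) :: ps

def prep (cur : List Char) : List (List Char) → List (List Char)
  | [] => []
  | p :: ps => (cur.reverse ++ p) :: ps

def glue : List (List Char) → List Char
  | [] => []
  | [p] => p
  | p :: ps => p ++ '-' :: glue ps

lemma split1_ne_nil (l : List Char) : split1 l ≠ [] := by
  cases l with
  | nil => simp [split1]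
  | cons c t =>
    simp only [split1]
    split
    · simp
    · split <;> simp

lemma go_spec : ∀ (fuel : Nat) (l cur : List Char) (acc : List (List Char)),
    l.length ≤ fuel →
    PySem.Chars.splitOn.go ['-'] fuel l cur acc = acc.reverse ++ prep cur (split1 l) := by
  intro fuel
  induction fuel with
  | zero =>
    intro l cur acc h
    have hl : l = [] := by
      cases l with
      | nil => rfl
      | cons a t => simp at h
    subst hl
    rw [PySem.Chars.splitOn.go.eq_def]
    simp [split1, prep]
  | succ f ih =>
    intro l cur acc h
    cases l with
    | nil =>
      rw [PySem.Chars.splitOn.go.eq_def]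
      simp [split1, prep]
    | cons c rest =>
      obtain ⟨p, ps, hps⟩ : ∃ p ps, split1 rest = p :: ps := by
        cases hsr : split1 rest with
        | nil => exact absurd hsr (split1_ne_nil rest)
        | cons p ps => exact ⟨p, ps, rfl⟩
      have hrest : rest.length ≤ f := by simpa using h
      rw [PySem.Chars.splitOn.go.eq_def]
      by_cases hc : c = '-'
      · subst hc
        have hpre : List.isPrefixOf ['-'] ('-' :: rest) = true := by
          simp [List.isPrefixOf]
        simp only [hpre, if_pos, List.length_cons, List.length_nil, List.drop_succ_cons, List.drop_zero]
        rw [ih rest [] (cur.reverse :: acc) hrest]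
        simp [split1, hps, prep]
      · have hpre : List.isPrefixOf ['-'] (c :: rest) = false := by
          simp [List.isPrefixOf]
          exact fun hh => absurd hh.symm hc
        simp only [hpre, Bool.false_eq_true, if_false]
        rw [ih rest (c :: cur) acc hrest]
        simp [split1, hc, hps, prep]

lemma splitOn_eq_split1 (l : List Char) : PySem.Chars.splitOn l ['-'] = split1 l := by
  unfold PySem.Chars.splitOn
  rw [go_spec (l.length + 1) l [] [] (Nat.le_succ _)]
  obtain ⟨p, ps, hps⟩ : ∃ p ps, split1 l = p :: ps := by
    cases hsr : split1 l with
    | nil => exact absurd hsr (split1_ne_nil l)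
    | cons p ps => exact ⟨p, ps, rfl⟩
  simp [hps, prep]

lemma rep_go_spec : ∀ (fuel : Nat) (l acc : List Char), l.length ≤ fuel →
    PySem.Chars.replace.go ['-'] [] fuel l acc = acc.reverse ++ l.filter (fun c => !(c == '-')) := by
  intro fuel
  induction fuel with
  | zero =>
    intro l acc h
    have hl : l = [] := by
      cases l with
      | nil => rfl
      | cons a t => simp at h
    subst hl
    rw [PySem.Chars.replace.go.eq_def]
    simp
  | succ f ih =>
    intro l acc h
    cases l with
    | nil =>
      rw [PySem.Chars.replace.go.eq_def]
      simp
    | cons c rest =>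
      have hrest : rest.length ≤ f := by simpa using h
      rw [PySem.Chars.replace.go.eq_def]
      by_cases hc : c = '-'
      · subst hc
        have hpre : List.isPrefixOf ['-'] ('-' :: rest) = true := by
          simp [List.isPrefixOf]
        simp only [hpre, if_pos, List.length_cons, List.length_nil, List.drop_succ_cons,
          List.drop_zero, List.reverse_nil, List.nil_append]
        rw [ih rest acc hrest]
        simp
      · have hpre : List.isPrefixOf ['-'] (c :: rest) = false := by
          simp [List.isPrefixOf]
          exact fun hh => absurd hh.symm hc
        simp only [hpre, Bool.false_eq_true, if_false]
        rw [ih rest (c :: acc) hrest]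
        simp [hc]

lemma replace_eq_filter (l : List Char) :
    PySem.Chars.replace l ['-'] [] = l.filter (fun c => !(c == '-')) := by
  unfold PySem.Chars.replace
  simp only [List.isEmpty_cons, Bool.false_eq_true, if_false]
  rw [rep_go_spec l.length l [] le_rfl]
  simp

lemma split1_no_dash (l : List Char) : ∀ p ∈ split1 l, '-' ∉ p := by
  induction l with
  | nil => simp [split1]
  | cons c t ih =>
    simp only [split1]
    by_cases hc : c = '-'
    · subst hc
      rw [if_pos rfl]
      intro p hp
      rcases List.mem_cons.mp hp with rfl | hp
      · simp
      · exact ih p hp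
    · obtain ⟨p, ps, hps⟩ : ∃ p ps, split1 t = p :: ps := by
        cases hsr : split1 t with
        | nil => exact absurd hsr (split1_ne_nil t)
        | cons p ps => exact ⟨p, ps, rfl⟩
      rw [if_neg hc, hps]
      intro q hq
      rcases List.mem_cons.mp hq with rfl | hq
      · intro hm
        rcases List.mem_cons.mp hm with hm | hm
        · exact hc hm.symm
        · exact ih p (by simp [hps]) hm
      · exact ih q (by simp [hps, hq])

lemma split1_glue (l : List Char) : glue (split1 l) = l := by
  induction l with
  | nil => simp [split1, glue]
  | cons c t ih =>
    obtain ⟨p, ps, hps⟩ : ∃ p ps, split1 t = p :: ps := by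
      cases hsr : split1 t with
      | nil => exact absurd hsr (split1_ne_nil t)
      | cons p ps => exact ⟨p, ps, rfl⟩
    simp only [split1]
    by_cases hc : c = '-'
    · subst hc
      rw [if_pos rfl, hps]
      rw [hps] at ih
      cases ps with
      | nil => simp [glue] at ih ⊢; exact ih
      | cons q qs => simp [glue] at ih ⊢; exact ih
    · simp only [hc, if_false, hps]
      rw [hps] at ih
      cases ps with
      | nil => simp [glue] at ih ⊢; exact ih
      | cons q qs =>
        simp [glue] at ih ⊢
        simp [ih]

lemma split1_of_glue (p t : List Char) (h : '-' ∉ p) :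
    split1 (p ++ '-' :: t) = p :: split1 t := by
  induction p with
  | nil => simp [split1]
  | cons a p' ih =>
    have ha : a ≠ '-' := fun hh => h (by simp [hh])
    have h' : '-' ∉ p' := fun hh => h (by simp [hh])
    simp only [List.cons_append, split1, ha, if_false, ih h']

lemma split1_single (p : List Char) (h : '-' ∉ p) : split1 p = [p] := by
  induction p with
  | nil => simp [split1]
  | cons a p' ih =>
    have ha : a ≠ '-' := fun hh => h (by simp [hh])
    have h' : '-' ∉ p' := fun hh => h (by simp [hh])
    simp only [split1, ha, if_false, ih h']

lemma mp_nil (l : List Char) : pvFullmatch [] l = true ↔ l = [] := by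
  cases l <;> simp [pvFullmatch]

lemma mp_append (ps qs : List (Char → Bool)) : ∀ l,
    (pvFullmatch (ps ++ qs) l = true ↔
      ∃ a b, l = a ++ b ∧ pvFullmatch ps a = true ∧ pvFullmatch qs b = true) := by
  induction ps with
  | nil =>
    intro l
    constructor
    · intro h
      exact ⟨[], l, rfl, rfl, by simpa using h⟩
    · rintro ⟨a, b, rfl, ha, hb⟩
      have : a = [] := (mp_nil a).mp ha
      subst this
      simpa using hb
  | cons p ps ih =>
    intro l
    cases l with
    | nil =>
      simp only [List.cons_append, pvFullmatch]
      constructor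
      · intro h; cases h
      · rintro ⟨a, b, hab, ha, hb⟩
        have : a = [] := by
          cases a with
          | nil => rfl
          | cons x xs => simp at hab
        subst this
        cases ha
    | cons c t =>
      simp only [List.cons_append, pvFullmatch, Bool.and_eq_true]
      constructor
      · rintro ⟨hpc, hrest⟩
        obtain ⟨a, b, rfl, ha, hb⟩ := (ih t).mp hrest
        exact ⟨c :: a, b, rfl, by simp [hpc, ha], hb⟩
      · rintro ⟨a, b, hab, ha, hb⟩
        cases a with
        | nil => cases ha
        | cons x xs =>
          obtain ⟨rfl, rfl⟩ : x = c ∧ t = xs ++ b := by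
            have := (List.cons.injEq c t x (xs ++ b)).mp hab
            exact ⟨this.1.symm, this.2⟩
          simp only [Bool.and_eq_true] at ha
          exact ⟨ha.1, (ih (xs ++ b)).mpr ⟨xs, b, rfl, ha.2, hb⟩⟩

lemma mp_rep (q : Char → Bool) : ∀ (n : Nat) (l : List Char),
    (pvFullmatch (List.replicate n q) l = true ↔ l.length = n ∧ ∀ c ∈ l, q c = true) := by
  intro n
  induction n with
  | zero =>
    intro l
    simp only [List.replicate, mp_nil]
    constructor
    · rintro rfl; simp
    · rintro ⟨h, _⟩; exact List.length_eq_zero_iff.mp h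
  | succ m ih =>
    intro l
    cases l with
    | nil => simp [List.replicate, pvFullmatch]
    | cons c t =>
      simp only [List.replicate, pvFullmatch, Bool.and_eq_true, ih t, List.length_cons,
        List.mem_cons]
      constructor
      · rintro ⟨hq, hlen, hall⟩
        exact ⟨by omega, by rintro x (rfl | hx); exact hq; exact hall x hx⟩
      · rintro ⟨hlen, hall⟩
        exact ⟨hall c (Or.inl rfl), by omega, fun x hx => hall x (Or.inr hx)⟩

lemma mp_single (q : Char → Bool) (l : List Char) :
    pvFullmatch [q] l = true ↔ ∃ c, l = [c] ∧ q c = true := by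
  cases l with
  | nil => simp [pvFullmatch]
  | cons c t =>
    cases t with
    | nil => simp [pvFullmatch]
    | cons d u => simp [pvFullmatch]

def Good (l : List Char) : Prop :=
  ∃ p0 p1 p2 p3 p4 : List Char,
    l = p0 ++ '-' :: (p1 ++ '-' :: (p2 ++ '-' :: (p3 ++ '-' :: p4))) ∧
    p0.length = 8 ∧ p1.length = 4 ∧ p2.length = 4 ∧ p3.length = 4 ∧ p4.length = 12 ∧
    (∀ c ∈ p0 ++ p1 ++ p2 ++ p3 ++ p4, pvHexClass c = true) ∧
    (∃ r, p2 = '4' :: r) ∧ (∃ w r, p3 = w :: r ∧ w ∈ ['8', '9', 'A', 'B'])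

lemma B_iff (l : List Char) : pvFullmatch pvGuidPattern l = true ↔ Good l := by
  unfold pvGuidPattern
  simp only [mp_append, mp_rep, mp_single, beq_iff_eq]
  constructor
  · rintro ⟨a, p4, rfl, ⟨a1, _, rfl, ⟨a2, r3, rfl, ⟨a3, _, rfl, ⟨a4, _, rfl,
      ⟨a5, r2, rfl, ⟨a6, _, rfl, ⟨a7, _, rfl, ⟨a8, p1, rfl, ⟨p0, _, rfl,
      ⟨hl0, hx0⟩, c1, rfl, rfl⟩, hl1, hx1⟩, c2, rfl, rfl⟩, c3, rfl, rfl⟩,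
      hl2, hx2⟩, c4, rfl, rfl⟩, w, rfl, hw⟩, hl3, hx3⟩, c5, rfl, rfl⟩, hl4, hx4⟩
    have hwmem : w ∈ ['8', '9', 'A', 'B'] := by
      have e : "89AB".toList = ['8', '9', 'A', 'B'] := rfl
      rw [e] at hw
      simpa using hw
    refine ⟨p0, p1, '4' :: r2, w :: r3, p4, by simp, hl0, hl1, by simp [hl2],
      by simp [hl3], hl4, ?_, ⟨r2, rfl⟩, ⟨w, r3, rfl, hwmem⟩⟩
    intro c hc
    simp only [List.mem_append, List.mem_cons] at hc
    rcases hc with (((hc | hc) | rfl | hc) | rfl | hc) | hc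
    · exact hx0 c hc
    · exact hx1 c hc
    · decide
    · exact hx2 c hc
    · have hw4 : c = '8' ∨ c = '9' ∨ c = 'A' ∨ c = 'B' := by simpa using hwmem
      rcases hw4 with rfl | rfl | rfl | rfl <;> decide
    · exact hx3 c hc
    · exact hx4 c hc
  · rintro ⟨p0, p1, p2, p3, p4, rfl, hl0, hl1, hl2, hl3, hl4, hx, ⟨r2, rfl⟩, ⟨w, r3, rfl, hw⟩⟩
    have hr2 : r2.length = 3 := by simp at hl2; omega
    have hr3 : r3.length = 3 := by simp at hl3; omega
    have hcw : "89AB".toList.contains w = true := by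
      have e : "89AB".toList = ['8', '9', 'A', 'B'] := rfl
      rw [e]
      simpa using hw
    simp only [List.mem_append, List.mem_cons] at hx
    refine ⟨p0 ++ ['-'] ++ p1 ++ ['-'] ++ ['4'] ++ r2 ++ ['-'] ++ [w] ++ r3 ++ ['-'], p4,
      by simp, ?_, hl4, fun c hc => hx c (by tauto)⟩
    refine ⟨p0 ++ ['-'] ++ p1 ++ ['-'] ++ ['4'] ++ r2 ++ ['-'] ++ [w] ++ r3, ['-'],
      by simp, ?_, '-', rfl, rfl⟩
    refine ⟨p0 ++ ['-'] ++ p1 ++ ['-'] ++ ['4'] ++ r2 ++ ['-'] ++ [w], r3,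
      by simp, ?_, hr3, fun c hc => hx c (by tauto)⟩
    refine ⟨p0 ++ ['-'] ++ p1 ++ ['-'] ++ ['4'] ++ r2 ++ ['-'], [w],
      by simp, ?_, w, rfl, hcw⟩
    refine ⟨p0 ++ ['-'] ++ p1 ++ ['-'] ++ ['4'] ++ r2, ['-'],
      by simp, ?_, '-', rfl, rfl⟩
    refine ⟨p0 ++ ['-'] ++ p1 ++ ['-'] ++ ['4'], r2,
      by simp, ?_, hr2, fun c hc => hx c (by tauto)⟩
    refine ⟨p0 ++ ['-'] ++ p1 ++ ['-'], ['4'],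
      by simp, ?_, '4', rfl, rfl⟩
    refine ⟨p0 ++ ['-'] ++ p1, ['-'], by simp, ?_, '-', rfl, rfl⟩
    refine ⟨p0 ++ ['-'], p1, by simp, ?_, hl1, fun c hc => hx c (by tauto)⟩
    exact ⟨p0, ['-'], by simp, ⟨hl0, fun c hc => hx c (by tauto)⟩, '-', rfl, rfl⟩

lemma isIn_singleton (v : Char) (l : List Char) : PySem.Chars.isIn [v] l = true ↔ v ∈ l := by
  rw [PySem.Chars.isIn_iff_infix]
  constructor
  · intro h
    exact List.singleton_sublist.mp h.sublist
  · intro h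
    obtain ⟨s, t, rfl⟩ := List.append_of_mem h
    exact ⟨s, t, by simp⟩

lemma pvHexSet_eq : pvHexSet = "0123456789ABCDEF".toList := by decide

lemma hexClass_ne_dash (c : Char) (h : pvHexClass c = true) : c ≠ '-' := by
  rintro rfl
  exact absurd h (by decide)

lemma A_iff (guid : String) : validate_guid_structure guid = true ↔ Good guid.toList := by
  have hs : PySem.Chars.split? guid.toList "-".toList = some (split1 guid.toList) := by
    have ht : "-".toList = ['-'] := rfl
    rw [ht]
    simp [PySem.Chars.split?, splitOn_eq_split1]
  unfold validate_guid_structure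
  rw [hs]
  constructor
  · intro h
    rcases hp : split1 guid.toList with _ | ⟨p0, _ | ⟨p1, _ | ⟨p2, _ | ⟨p3, _ | ⟨p4, _ | ⟨p5, ps⟩⟩⟩⟩⟩⟩ <;>
      rw [hp] at h <;> try simp at h
    obtain ⟨⟨⟨⟨⟨hl0, hl1⟩, hl2⟩, hl3⟩, hl4⟩, hhex, hrest⟩ := h
    have hglue : p0 ++ '-' :: (p1 ++ '-' :: (p2 ++ '-' :: (p3 ++ '-' :: p4))) = guid.toList := by
      have hg := split1_glue guid.toList
      rw [hp] at hg
      exact hg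
    have hd0 : '-' ∉ p0 := split1_no_dash _ p0 (by rw [hp]; simp)
    have hd1 : '-' ∉ p1 := split1_no_dash _ p1 (by rw [hp]; simp)
    have hd2 : '-' ∉ p2 := split1_no_dash _ p2 (by rw [hp]; simp)
    have hd3 : '-' ∉ p3 := split1_no_dash _ p3 (by rw [hp]; simp)
    have hd4 : '-' ∉ p4 := split1_no_dash _ p4 (by rw [hp]; simp)
    have hfil : List.filter (fun c => !(c == '-')) guid.toList = p0 ++ p1 ++ p2 ++ p3 ++ p4 := by
      rw [← hglue]
      simp only [List.filter_append, List.filter_cons]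
      have f0 : p0.filter (fun c => !(c == '-')) = p0 :=
        List.filter_eq_self.mpr (fun a ha => by simp; rintro rfl; exact hd0 ha)
      have f1 : p1.filter (fun c => !(c == '-')) = p1 :=
        List.filter_eq_self.mpr (fun a ha => by simp; rintro rfl; exact hd1 ha)
      have f2 : p2.filter (fun c => !(c == '-')) = p2 :=
        List.filter_eq_self.mpr (fun a ha => by simp; rintro rfl; exact hd2 ha)
      have f3 : p3.filter (fun c => !(c == '-')) = p3 :=
        List.filter_eq_self.mpr (fun a ha => by simp; rintro rfl; exact hd3 ha)
      have f4 : p4.filter (fun c => !(c == '-')) = p4 :=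
        List.filter_eq_self.mpr (fun a ha => by simp; rintro rfl; exact hd4 ha)
      simp [f0, f1, f2, f3, f4]
    rw [replace_eq_filter, hfil] at hhex
    have hxc : ∀ c ∈ p0 ++ p1 ++ p2 ++ p3 ++ p4, pvHexClass c = true := by
      intro c hc
      have := hhex c hc
      rw [pvHexSet_eq] at this
      simpa [pvHexClass] using this
    obtain ⟨v, r2, rfl⟩ : ∃ v r2, p2 = v :: r2 := by
      cases p2 with
      | nil => simp at hl2
      | cons v r2 => exact ⟨v, r2, rfl⟩
    obtain ⟨w, r3, rfl⟩ : ∃ w r3, p3 = w :: r3 := by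
      cases p3 with
      | nil => simp at hl3
      | cons w r3 => exact ⟨w, r3, rfl⟩
    have hg2 : PySem.List.pyGet? (v :: r2) (0 : Int) = some v := by
      simp [PySem.List.pyGet?, PySem.List.pyIdx?]
    have hg3 : PySem.List.pyGet? (w :: r3) (0 : Int) = some w := by
      simp [PySem.List.pyGet?, PySem.List.pyIdx?]
    rw [hg2, hg3] at hrest
    simp only [Bool.and_eq_true, isIn_singleton] at hrest
    obtain ⟨hv, hw⟩ := hrest
    have hv' : v = '4' := by simpa using hv
    subst hv'
    exact ⟨p0, p1, '4' :: r2, w :: r3, p4, hglue.symm, hl0, hl1, hl2, hl3, hl4, hxc,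
      ⟨r2, rfl⟩, ⟨w, r3, rfl, hw⟩⟩
  · rintro ⟨p0, p1, p2, p3, p4, hl, hl0, hl1, hl2, hl3, hl4, hx, ⟨r2, rfl⟩, ⟨w, r3, rfl, hw⟩⟩
    simp only [List.mem_append, List.mem_cons] at hx
    have hd0 : '-' ∉ p0 := fun hm => hexClass_ne_dash '-' (hx '-' (by tauto)) rfl
    have hd1 : '-' ∉ p1 := fun hm => hexClass_ne_dash '-' (hx '-' (by tauto)) rfl
    have hd2 : '-' ∉ ('4' :: r2) := by
      intro hm
      rcases List.mem_cons.mp hm with e | hm'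
      · exact absurd e (by decide)
      · exact hexClass_ne_dash '-' (hx '-' (by tauto)) rfl
    have hd3 : '-' ∉ (w :: r3) := by
      intro hm
      rcases List.mem_cons.mp hm with e | hm'
      · exact hexClass_ne_dash '-' (hx '-' (by tauto)) rfl
      · exact hexClass_ne_dash '-' (hx '-' (by tauto)) rfl
    have hd4 : '-' ∉ p4 := fun hm => hexClass_ne_dash '-' (hx '-' (by tauto)) rfl
    have hp : split1 guid.toList = [p0, p1, '4' :: r2, w :: r3, p4] := by
      rw [hl, split1_of_glue _ _ hd0, split1_of_glue _ _ hd1, split1_of_glue _ _ hd2,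
        split1_of_glue _ _ hd3, split1_single _ hd4]
    have hwne : w ≠ '-' := fun e => hexClass_ne_dash w (hx w (by tauto)) e
    have hfil : List.filter (fun c => !(c == '-')) guid.toList
        = p0 ++ p1 ++ ('4' :: r2) ++ (w :: r3) ++ p4 := by
      rw [hl]
      have f0 : p0.filter (fun c => !(c == '-')) = p0 :=
        List.filter_eq_self.mpr (fun a ha => by simp; rintro rfl; exact hd0 ha)
      have f1 : p1.filter (fun c => !(c == '-')) = p1 :=
        List.filter_eq_self.mpr (fun a ha => by simp; rintro rfl; exact hd1 ha)
      have fr2 : r2.filter (fun c => !(c == '-')) = r2 :=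
        List.filter_eq_self.mpr (fun a ha => by simp; rintro rfl; exact hd2 (by simp [ha]))
      have fr3 : r3.filter (fun c => !(c == '-')) = r3 :=
        List.filter_eq_self.mpr (fun a ha => by simp; rintro rfl; exact hd3 (by simp [ha]))
      have f4 : p4.filter (fun c => !(c == '-')) = p4 :=
        List.filter_eq_self.mpr (fun a ha => by simp; rintro rfl; exact hd4 ha)
      simp [List.filter_append, hwne, f0, f1, fr2, fr3, f4]
    have hclean : ∀ c ∈ p0 ++ p1 ++ '4' :: r2 ++ w :: r3 ++ p4, c ∈ pvHexSet := by
      intro c hc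
      simp only [List.mem_append, List.mem_cons] at hc
      have hhc : pvHexClass c = true := hx c (by tauto)
      rw [pvHexSet_eq]
      simpa [pvHexClass] using hhc
    rw [hp]
    simp [replace_eq_filter, hfil, hl0, hl1, hl2, hl3, hl4, isIn_singleton, hw, hclean]
    simp only [List.mem_append, List.mem_cons] at hclean
    exact ⟨fun x hx' => hclean x (by tauto), fun x hx' => hclean x (by tauto),
      fun x hx' => hclean x (by tauto), fun x hx' => hclean x (by tauto),
      fun x hx' => hclean x (by tauto)⟩

-- ===== VERDICT (by name: the statement is the Claim_ definition above) =====
theorem validate_guid_structure_spec : Claim_equal_validate_guid_structure := by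
  intro guid _
  unfold Spec_validate_guid_structure
  have h := (A_iff guid).trans (B_iff guid.toList).symm
  cases hA : validate_guid_structure guid <;>
    cases hB : pvFullmatch pvGuidPattern guid.toList <;>
      simp_all [validate_guid_structure_alt]
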